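-- pv_equiv track=rewrite | github.com/PicoPlanetDev/computational-math | unit-2/sigmondUnitTwo.py | carrylessAdd
-- ===== SOURCE A (Python) =====
-- import math
--
-- def carrylessAdd(x,y):
--     result = 0
--     place = 1
--     result = 0
--     while (x or y) :
--         result = (((x % 10) + (y % 10))%10 * place) + result
--         x = math.floor(x / 10)
--         y = math.floor(y / 10)
--         place *= 10
--     return result
-- ===== SOURCE B (Python) =====
-- def carrylessAdd(x, y):
--     sx, sy = str(x), str(y)
--     width = max(len(sx), len(sy))
--     sx, sy = sx.zfill(width), sy.zfill(width)
--     total = 0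
--     for a, b in zip(sx, sy):
--         total = total * 10 + (int(a) + int(b)) % 10
--     return total
-- ===== Notes on version B (the rewrite author's own statement) =====
-- stated objective: alternative
-- what changed: B works on the decimal string representations: it zero-pads str(x) and str(y) to equal width and folds over the aligned character pairs most-significant-first (total = total*10 + (int(a)+int(b))%10), instead of A's bottom-up arithmetic loop extracting digits with % 10 and math.floor(x/10) and accumulating with a growing place multiplier.
import Mathlib
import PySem

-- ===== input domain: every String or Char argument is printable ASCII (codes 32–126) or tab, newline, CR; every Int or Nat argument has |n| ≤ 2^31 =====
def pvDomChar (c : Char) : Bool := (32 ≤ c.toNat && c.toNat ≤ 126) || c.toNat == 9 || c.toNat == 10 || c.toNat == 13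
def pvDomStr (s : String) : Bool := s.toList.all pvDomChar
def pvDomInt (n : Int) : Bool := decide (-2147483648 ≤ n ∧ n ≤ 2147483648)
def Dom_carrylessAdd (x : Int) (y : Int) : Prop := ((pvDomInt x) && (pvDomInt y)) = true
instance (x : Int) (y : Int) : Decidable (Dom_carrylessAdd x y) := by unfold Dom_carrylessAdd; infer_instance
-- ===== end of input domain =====

-- B re-implements carryless addition over the zero-padded decimal string representations
-- (most-significant-first fold) instead of A's bottom-up %10 / floor-division loop: an
-- alternative algorithm of the same cost. A loops forever on negative input (math.floor(x/10)
-- is stuck at -1), so Pre_ restricts to nonnegative x and y; B raises ValueError there.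


-- ===== PORT A =====
-- 'while (x or y)' loop; fuel only makes the recursion total: 64 iterations are enough for
-- every |x|,|y| ≤ 2^31 admitted by Dom (the Python loop runs ≤ 11 times on Pre_ inputs).
-- 'math.floor(x / 10)' is ported as floor division by 10: exact for |x| ≤ 2^31 (float
-- division by 10 is correctly rounded and |x| « 2^53, so the floor is the same integer).
def carrylessAddLoop : Nat → Int → Int → Int → Int → Int
  | 0, _, _, _, result => result
  | fuel + 1, x, y, place, result =>
    if x ≠ 0 ∨ y ≠ 0 then
      carrylessAddLoop fuel (PySem.Int.floordiv x 10) (PySem.Int.floordiv y 10) (place * 10)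
        (PySem.Int.mod (PySem.Int.mod x 10 + PySem.Int.mod y 10) 10 * place + result)
    else result

def carrylessAdd (x : Int) (y : Int) : Int := carrylessAddLoop 64 x y 1 0

-- ===== PORT B =====
-- int(a) for the one-character string a; on Pre_ inputs a is always a decimal digit, so
-- int() never raises and the .getD 0 default is unreachable.
def pyDigitVal (c : Char) : Int := (PySem.Int.ofChars? [c]).getD 0

def carrylessAdd_alt (x : Int) (y : Int) : Int :=
  let sx := PySem.Int.toChars x
  let sy := PySem.Int.toChars y
  let width := max (PySem.List.len sx) (PySem.List.len sy)
  let px := PySem.Chars.zfill sx width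
  let py := PySem.Chars.zfill sy width
  (px.zip py).foldl
    (fun total ab => total * 10 + PySem.Int.mod (pyDigitVal ab.1 + pyDigitVal ab.2) 10) 0

-- ===== PRECONDITION & SPEC =====
-- A never terminates on a negative argument (math.floor(x/10) gets stuck at -1), so those
-- inputs are excluded; B raises ValueError there. Pre_ is exactly the set where A returns.
def Pre_carrylessAdd (x : Int) (y : Int) : Prop := 0 ≤ x ∧ 0 ≤ y
instance (x : Int) (y : Int) : Decidable (Pre_carrylessAdd x y) := by unfold Pre_carrylessAdd; infer_instance

def pvWitness_carrylessAdd : Int × Int := (785, 376)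

def Spec_carrylessAdd (x : Int) (y : Int) (out : Int) : Prop := out = carrylessAdd_alt x y
instance (x : Int) (y : Int) (out : Int) : Decidable (Spec_carrylessAdd x y out) := by unfold Spec_carrylessAdd; infer_instance

-- ===== CLAIM (what is proved, stated in full; the proofs are below) =====
def Claim_equal_carrylessAdd : Prop := ∀ (x : Int) (y : Int), Dom_carrylessAdd x y → Pre_carrylessAdd x y → Spec_carrylessAdd x y (carrylessAdd x y)

-- ===== LEMMAS AND PROOFS =====

-- the common mathematical value: digit-wise sum mod 10 of the Nat arguments
def carrylessF : Nat → Nat → Nat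
  | a, b =>
    if h : a = 0 ∧ b = 0 then 0
    else (a % 10 + b % 10) % 10 + 10 * carrylessF (a / 10) (b / 10)
  termination_by a b => a + b
  decreasing_by
    have hb' := Nat.div_le_self b 10
    rcases Nat.eq_zero_or_pos a with h0 | h0
    · have : 0 < b := by omega
      have := Nat.div_lt_self this (by norm_num : 1 < 10)
      omega
    · have := Nat.div_lt_self h0 (by norm_num : 1 < 10)
      omega

theorem carrylessF_eq (a b : Nat) :
    carrylessF a b = (a % 10 + b % 10) % 10 + 10 * carrylessF (a / 10) (b / 10) := by
  by_cases h : a = 0 ∧ b = 0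
  · rcases h with ⟨ha, hb⟩
    subst ha; subst hb
    simp [carrylessF]
  · conv_lhs => rw [carrylessF.eq_def]
    dsimp only
    rw [dif_neg h]

-- ===== A-side: the fuelled loop computes carrylessF =====
theorem carrylessAddLoop_eq (f : Nat) :
    ∀ (a b : Nat) (place result : Int), a < 10 ^ f → b < 10 ^ f →
      carrylessAddLoop f a b place result = place * (carrylessF a b : Int) + result := by
  induction f with
  | zero =>
    intro a b place result ha hb
    interval_cases a
    interval_cases b
    simp [carrylessF, carrylessAddLoop]
  | succ f ih =>
    intro a b place result ha hb
    by_cases h0 : a = 0 ∧ b = 0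
    · rcases h0 with ⟨ha0, hb0⟩
      subst ha0; subst hb0
      simp [carrylessF, carrylessAddLoop]
    · have hcond : (a : Int) ≠ 0 ∨ (b : Int) ≠ 0 := by
        rcases Decidable.not_and_iff_or_not.mp h0 with h | h
        · left; exact_mod_cast h
        · right; exact_mod_cast h
      rw [carrylessAddLoop, if_pos hcond]
      have hfa : PySem.Int.floordiv (a : Int) 10 = ((a / 10 : Nat) : Int) := by
        exact_mod_cast PySem.Int.floordiv_natCast a 10
      have hfb : PySem.Int.floordiv (b : Int) 10 = ((b / 10 : Nat) : Int) := by
        exact_mod_cast PySem.Int.floordiv_natCast b 10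
      rw [hfa, hfb]
      have hmod : PySem.Int.mod (PySem.Int.mod (a : Int) 10 + PySem.Int.mod (b : Int) 10) 10
          = ((a % 10 + b % 10) % 10 : Nat) := by
        have h1 : PySem.Int.mod (a : Int) 10 = ((a % 10 : Nat) : Int) := by
          exact_mod_cast PySem.Int.mod_natCast a 10
        have h2 : PySem.Int.mod (b : Int) 10 = ((b % 10 : Nat) : Int) := by
          exact_mod_cast PySem.Int.mod_natCast b 10
        rw [h1, h2]
        push_cast
        exact_mod_cast PySem.Int.mod_natCast (a % 10 + b % 10) 10
      rw [hmod, ih (a / 10) (b / 10) (place * 10) _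
            (Nat.div_lt_of_lt_mul (by rwa [← pow_succ'] )) (Nat.div_lt_of_lt_mul (by rwa [← pow_succ']))]
      rw [carrylessF_eq a b]
      push_cast
      ring

-- ===== toDigits: unfolding lemmas (Nat.toDigits is fuelled internally) =====
theorem toDigitsCore_accum (b : Nat) : ∀ (f n : Nat) (l : List Char),
    Nat.toDigitsCore b f n l = Nat.toDigitsCore b f n [] ++ l := by
  intro f
  induction f with
  | zero => intro n l; simp [Nat.toDigitsCore]
  | succ f ih =>
    intro n l
    simp only [Nat.toDigitsCore]
    split_ifs with h
    · simp
    · rw [ih (n / b) [Nat.digitChar (n % b)], ih (n / b) (Nat.digitChar (n % b) :: l)]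
      simp

theorem toDigitsCore_canon : ∀ (f m : Nat) (l : List Char), m < f →
    Nat.toDigitsCore 10 f m l = Nat.toDigitsCore 10 (m + 1) m l := by
  intro f
  induction f using Nat.strong_induction_on with
  | _ f ih =>
    intro m l hm
    match f, hm with
    | f + 1, hm =>
      simp only [Nat.toDigitsCore]
      split_ifs with h
      · rfl
      · have hmpos : 0 < m := by
          rcases Nat.eq_zero_or_pos m with h0 | h0
          · subst h0; simp at h
          · exact h0
        have hdiv : m / 10 < m := Nat.div_lt_self hmpos (by norm_num)
        rw [ih f (by omega) (m / 10) _ (by omega),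
            ih m (by omega) (m / 10) _ hdiv]

theorem toDigits_of_lt (m : Nat) (hm : m < 10) : Nat.toDigits 10 m = [Nat.digitChar m] := by
  rw [Nat.toDigits]
  simp [Nat.toDigitsCore, Nat.div_eq_of_lt hm, Nat.mod_eq_of_lt hm]

theorem toDigits_of_ge (m : Nat) (hm : 10 ≤ m) :
    Nat.toDigits 10 m = Nat.toDigits 10 (m / 10) ++ [Nat.digitChar (m % 10)] := by
  have hdiv : m / 10 ≠ 0 := by
    intro h
    have := Nat.div_eq_of_lt (show m < 10 by omega)
    omega
  conv_lhs => rw [Nat.toDigits]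
  simp only [Nat.toDigitsCore, hdiv, if_false]
  rw [toDigitsCore_canon m (m / 10) _ (Nat.div_lt_self (by omega) (by norm_num)),
      toDigitsCore_accum]
  rfl

theorem toDigits_ne_nil (m : Nat) : Nat.toDigits 10 m ≠ [] := by
  rcases Nat.lt_or_ge m 10 with h | h
  · simp [toDigits_of_lt m h]
  · simp [toDigits_of_ge m h]

theorem toDigits_mem (m : Nat) : ∀ c ∈ Nat.toDigits 10 m, ∃ d, d < 10 ∧ c = Nat.digitChar d := by
  induction m using Nat.strong_induction_on with
  | _ m ih =>
    intro c hc
    rcases Nat.lt_or_ge m 10 with h | h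
    · rw [toDigits_of_lt m h] at hc
      simp at hc
      exact ⟨m, h, hc⟩
    · rw [toDigits_of_ge m h] at hc
      rcases List.mem_append.mp hc with hc | hc
      · exact ih (m / 10) (Nat.div_lt_self (by omega) (by norm_num)) c hc
      · simp at hc
        exact ⟨m % 10, Nat.mod_lt m (by norm_num), hc⟩

theorem toDigits_lt_pow (m : Nat) : m < 10 ^ (Nat.toDigits 10 m).length := by
  induction m using Nat.strong_induction_on with
  | _ m ih =>
    rcases Nat.lt_or_ge m 10 with h | h
    · rw [toDigits_of_lt m h]; simpa using h
    · rw [toDigits_of_ge m h]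
      have hlt := ih (m / 10) (Nat.div_lt_self (by omega) (by norm_num))
      simp only [List.length_append, List.length_singleton, pow_succ]
      calc m < (m / 10 + 1) * 10 := by omega
        _ ≤ 10 ^ (Nat.toDigits 10 (m / 10)).length * 10 :=
            Nat.mul_le_mul_right 10 (by omega)

-- digit values
theorem pyDigitVal_digitChar (d : Nat) (hd : d < 10) : pyDigitVal (Nat.digitChar d) = (d : Int) := by
  interval_cases d <;> decide

theorem digitChar_ne_sign (d : Nat) (hd : d < 10) :
    ¬(Nat.digitChar d = '+' ∨ Nat.digitChar d = '-') := by
  interval_cases d <;> decide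

-- padded most-significant-first digit string
def padMSB (w m : Nat) : List Char :=
  List.replicate (w - (Nat.toDigits 10 m).length) '0' ++ Nat.toDigits 10 m

theorem length_padMSB (w m : Nat) (h : (Nat.toDigits 10 m).length ≤ w) :
    (padMSB w m).length = w := by
  simp [padMSB]
  omega

theorem padMSB_step (w m : Nat) (hw : 1 ≤ w) :
    padMSB (w + 1) m = padMSB w (m / 10) ++ [Nat.digitChar (m % 10)] := by
  rcases Nat.lt_or_ge m 10 with h | h
  · have hdiv : m / 10 = 0 := Nat.div_eq_of_lt h
    have hmod : m % 10 = m := Nat.mod_eq_of_lt h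
    rw [hdiv, hmod]
    simp only [padMSB, toDigits_of_lt m h, toDigits_of_lt 0 (by norm_num)]
    simp only [List.length_singleton]
    rw [show w + 1 - 1 = w from rfl, show Nat.digitChar 0 = '0' from rfl]
    rw [show List.replicate w '0' = List.replicate (w - 1) '0' ++ ['0'] by
      rw [← List.replicate_succ']
      congr 1
      omega]
  · rw [padMSB, toDigits_of_ge m h]
    simp only [List.length_append, List.length_singleton]
    rw [padMSB]
    rw [show w + 1 - ((Nat.toDigits 10 (m / 10)).length + 1) = w - (Nat.toDigits 10 (m / 10)).length by omega]
    simp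

-- B-side core: folding the zipped padded digit strings computes carrylessF
theorem fold_padMSB (w : Nat) (hw : 1 ≤ w) : ∀ (a b : Nat), a < 10 ^ w → b < 10 ^ w →
    ((padMSB w a).zip (padMSB w b)).foldl
      (fun total ab => total * 10 + PySem.Int.mod (pyDigitVal ab.1 + pyDigitVal ab.2) 10) 0
      = (carrylessF a b : Int) := by
  induction w, hw using Nat.le_induction with
  | base =>
    intro a b ha hb
    rw [pow_one] at ha hb
    rw [padMSB, padMSB, toDigits_of_lt a ha, toDigits_of_lt b hb]
    simp only [List.length_singleton, Nat.sub_self, List.replicate_zero, List.nil_append,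
      List.zip_cons_cons, List.zip_nil_right, List.foldl_cons, List.foldl_nil]
    rw [pyDigitVal_digitChar a ha, pyDigitVal_digitChar b hb]
    rw [carrylessF_eq a b, Nat.div_eq_of_lt ha, Nat.div_eq_of_lt hb]
    have hF0 : carrylessF 0 0 = 0 := by simp [carrylessF]
    rw [hF0]
    have : PySem.Int.mod ((a : Int) + (b : Int)) 10 = ((a + b) % 10 : Nat) := by
      push_cast
      exact_mod_cast PySem.Int.mod_natCast (a + b) 10
    rw [this]
    push_cast
    omega
  | succ w hw ih =>
    intro a b ha hb
    rw [padMSB_step w a hw, padMSB_step w b hw]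
    have hlen : (padMSB w (a / 10)).length = (padMSB w (b / 10)).length := by
      rw [length_padMSB, length_padMSB]
      · exact Nat.toDigits_length 10 (b / 10) w (by omega)
          (Nat.div_lt_of_lt_mul (by rwa [← pow_succ']))
      · exact Nat.toDigits_length 10 (a / 10) w (by omega)
          (Nat.div_lt_of_lt_mul (by rwa [← pow_succ']))
    rw [List.zip_append hlen]
    rw [List.foldl_append]
    rw [ih (a / 10) (b / 10) (Nat.div_lt_of_lt_mul (by rwa [← pow_succ']))
          (Nat.div_lt_of_lt_mul (by rwa [← pow_succ']))]
    simp only [List.zip_cons_cons, List.zip_nil_right, List.foldl_cons, List.foldl_nil]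
    rw [pyDigitVal_digitChar (a % 10) (Nat.mod_lt a (by norm_num)),
        pyDigitVal_digitChar (b % 10) (Nat.mod_lt b (by norm_num))]
    have : PySem.Int.mod ((a % 10 : Nat) + (b % 10 : Nat) : Int) 10 = ((a % 10 + b % 10) % 10 : Nat) := by
      push_cast
      exact_mod_cast PySem.Int.mod_natCast (a % 10 + b % 10) 10
    rw [this, carrylessF_eq a b]
    push_cast
    ring

-- zfill on an unsigned digit string is plain left padding
theorem zfill_digits (m : Nat) (w : Int) :
    PySem.Chars.zfill (Nat.toDigits 10 m) w = padMSB w.toNat m := by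
  obtain ⟨c, rest, hcs⟩ := List.exists_cons_of_ne_nil (toDigits_ne_nil m)
  obtain ⟨d, hd10, hcd⟩ := toDigits_mem m c (by rw [hcs]; exact List.mem_cons_self)
  rw [padMSB, hcs]
  simp only [PySem.Chars.zfill]
  split_ifs with hw hsign
  · have : w.toNat - (c :: rest).length = 0 := by
      simp only [List.length_cons] at hw ⊢
      omega
    rw [this]
    simp
  · exact absurd hsign (hcd ▸ digitChar_ne_sign d hd10)
  · rfl

theorem toChars_nonneg (x : Int) (hx : 0 ≤ x) :
    PySem.Int.toChars x = Nat.toDigits 10 x.toNat := by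
  rw [PySem.Int.toChars, if_neg (by omega)]

theorem toDigits_length_pos (m : Nat) : 1 ≤ (Nat.toDigits 10 m).length :=
  List.length_pos_of_ne_nil (toDigits_ne_nil m)

theorem carrylessAdd_alt_eq (x y : Int) (hx : 0 ≤ x) (hy : 0 ≤ y) :
    carrylessAdd_alt x y = (carrylessF x.toNat y.toNat : Int) := by
  unfold carrylessAdd_alt
  rw [toChars_nonneg x hx, toChars_nonneg y hy]
  simp only [PySem.List.len]
  set a := x.toNat
  set b := y.toNat
  set La := (Nat.toDigits 10 a).length with hLa
  set Lb := (Nat.toDigits 10 b).length with hLb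
  have hmax : (max (La : Int) (Lb : Int)).toNat = max La Lb := by omega
  rw [zfill_digits a, zfill_digits b, hmax]
  have hW : 1 ≤ max La Lb := le_trans (toDigits_length_pos a) (Nat.le_max_left _ _)
  have hpow : ∀ m : Nat, (Nat.toDigits 10 m).length ≤ max La Lb → m < 10 ^ max La Lb :=
    fun m hm => lt_of_lt_of_le (toDigits_lt_pow m) (Nat.pow_le_pow_right (by norm_num) hm)
  exact fold_padMSB (max La Lb) hW a b
    (hpow a (Nat.le_max_left _ _)) (hpow b (Nat.le_max_right _ _))

-- ===== VERDICT (by name: the statement is the Claim_ definition above) =====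
theorem carrylessAdd_spec : Claim_equal_carrylessAdd := by
  intro x y hdom hpre
  obtain ⟨hx, hy⟩ := hpre
  simp only [Dom_carrylessAdd, pvDomInt, Bool.and_eq_true, decide_eq_true_eq] at hdom
  unfold Spec_carrylessAdd
  have hxa : x = ((x.toNat : Nat) : Int) := (Int.toNat_of_nonneg hx).symm
  have hya : y = ((y.toNat : Nat) : Int) := (Int.toNat_of_nonneg hy).symm
  have hax : x.toNat < 10 ^ 64 := by
    have h1 : x.toNat ≤ 2147483648 := by omega
    calc x.toNat ≤ 2147483648 := h1
      _ < 10 ^ 64 := by norm_num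
  have hay : y.toNat < 10 ^ 64 := by
    have h1 : y.toNat ≤ 2147483648 := by omega
    calc y.toNat ≤ 2147483648 := h1
      _ < 10 ^ 64 := by norm_num
  rw [carrylessAdd, hxa, hya, carrylessAddLoop_eq 64 x.toNat y.toNat 1 0 hax hay,
      ← hxa, ← hya, carrylessAdd_alt_eq x y hx hy]
  simp
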